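-- pv_equiv track=rewrite | github.com/zhulei1110/DouZero_AI_auto_play_for_HLDDZ | helpers/GameHelper.py | find_repeated_cards_click_position
-- ===== SOURCE A (Python) =====
-- def find_repeated_cards_click_position(cards, cards_pos_dict):
--     result = {}
--     cards_count = {card: cards.count(card) for card in set(cards)}  # 统计传入的每种卡牌的数量
--
--     for card in cards:
--         if card in cards_pos_dict:
--             if card not in result:
--                 result[card] = []
--             card_positions = cards_pos_dict[card]
--             count_needed = cards_count[card]
--             count_selected = len(result[card])
--
--             while count_selected < count_needed and count_selected < len(card_positions):
--                 result[card].append(card_positions[count_selected])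
--                 count_selected += 1
--
--     # 确保每种卡牌只取到需要的数量，并且如果有多个，则取第一个和最后一个
--     for card in result:
--         if len(result[card]) > 1:
--             result[card] = [result[card][0], result[card][-1]]
--         elif len(result[card]) == 1:
--             result[card] = [result[card][0]]
--
--     return result
-- ===== SOURCE B (Python) =====
-- def find_repeated_cards_click_position(cards, cards_pos_dict):
--     counts = {}
--     for card in cards:
--         counts[card] = counts.get(card, 0) + 1
--     result = {}
--     for card in cards:
--         if card in cards_pos_dict and card not in result:
--             positions = cards_pos_dict[card]
--             n = min(counts[card], len(positions))
--             if n == 0: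
--                 result[card] = []
--             elif n == 1:
--                 result[card] = [positions[0]]
--             else:
--                 result[card] = [positions[0], positions[n - 1]]
--     return result
-- ===== Notes on version B (the rewrite author's own statement) =====
-- stated objective: faster
-- what changed: Replaces A's per-occurrence while-loop that incrementally appends candidate positions plus a separate trimming pass with a single pass that counts multiplicities once and directly assigns the endpoint positions per card.
import Mathlib
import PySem

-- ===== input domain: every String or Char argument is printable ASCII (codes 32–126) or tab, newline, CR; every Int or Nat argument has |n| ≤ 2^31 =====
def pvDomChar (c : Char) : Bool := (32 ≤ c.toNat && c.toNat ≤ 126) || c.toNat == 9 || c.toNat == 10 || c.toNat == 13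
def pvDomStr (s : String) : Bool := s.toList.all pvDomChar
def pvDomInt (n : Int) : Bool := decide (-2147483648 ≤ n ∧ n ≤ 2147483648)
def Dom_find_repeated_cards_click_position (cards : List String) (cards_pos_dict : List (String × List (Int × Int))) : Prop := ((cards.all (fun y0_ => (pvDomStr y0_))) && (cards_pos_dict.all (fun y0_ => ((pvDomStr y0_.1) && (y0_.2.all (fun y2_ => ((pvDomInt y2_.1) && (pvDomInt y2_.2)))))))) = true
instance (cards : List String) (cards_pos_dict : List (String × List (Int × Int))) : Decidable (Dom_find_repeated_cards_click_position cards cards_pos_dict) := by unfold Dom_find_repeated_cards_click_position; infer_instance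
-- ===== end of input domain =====

-- ===== PORT A =====
-- B changes: one counting pass plus direct endpoint selection instead of A's incremental
-- while-loop build followed by a separate trimming pass (objective: faster, measured).
-- A, literal transliteration. The while-loop is pvWhileA; Python's in-place value update
-- 'for card in result: result[card] = trim(result[card])' keeps all keys and rewrites each
-- value, i.e. a map of pvTrimA over the items.
def pvWhileA (ps : List (Int × Int)) (needed : Int) (cur : List (Int × Int)) : List (Int × Int) :=
  if h : (cur.length : Int) < needed ∧ cur.length < ps.length then
    pvWhileA ps needed (cur ++ [ps[cur.length]'h.2])
  else cur
termination_by ps.length - cur.length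
decreasing_by simp; omega

def pvTrimA (v : List (Int × Int)) : List (Int × Int) :=
  if 1 < v.length then
    match PySem.List.pyGet? v 0, PySem.List.pyGet? v (-1) with
    | some a, some b => [a, b]
    | _, _ => v
  else if v.length = 1 then
    match PySem.List.pyGet? v 0 with
    | some a => [a]
    | none => v
  else v

def pvStepA (cards_count : PySem.Dict String Int) (d : PySem.Dict String (List (Int × Int)))
    (result : PySem.Dict String (List (Int × Int))) (card : String) : PySem.Dict String (List (Int × Int)) :=
  match d.get? card with
  | none => result
  | some card_positions =>
    let result := if result.contains card then result else result.insert card []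
    let count_needed := cards_count.getD card 0
    result.insert card (pvWhileA card_positions count_needed (result.getD card []))

def find_repeated_cards_click_position (cards : List String) (cards_pos_dict : List (String × List (Int × Int))) : List (String × List (Int × Int)) :=
  -- cards_count = {card: cards.count(card) for card in set(cards)}: values depend only on the
  -- key, so the (unmodelled) set iteration order cannot affect any later lookup.
  let cards_count : PySem.Dict String Int :=
    PySem.Dict.mk ((PySem.Set.ofList cards).map (fun c => (c, (PySem.List.count cards c : Int))))
  let d : PySem.Dict String (List (Int × Int)) := PySem.Dict.mk cards_pos_dict
  let result := cards.foldl (pvStepA cards_count d) PySem.Dict.empty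
  (result.items.map (fun p => (p.1, pvTrimA p.2)))

-- ===== PORT B =====
def pvStepB (counts : PySem.Dict String Int) (d : PySem.Dict String (List (Int × Int)))
    (result : PySem.Dict String (List (Int × Int))) (card : String) : PySem.Dict String (List (Int × Int)) :=
  if d.contains card && !(result.contains card) then
    let positions := d.getD card []
    let n := min (counts.getD card 0) (positions.length : Int)
    if n == 0 then result.insert card []
    else if n == 1 then result.insert card [PySem.List.pyGetD positions 0 (0, 0)]
    else result.insert card [PySem.List.pyGetD positions 0 (0, 0), PySem.List.pyGetD positions (n - 1) (0, 0)]
  else result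

def find_repeated_cards_click_position_alt (cards : List String) (cards_pos_dict : List (String × List (Int × Int))) : List (String × List (Int × Int)) :=
  let counts := cards.foldl (fun d c => d.insert c (d.getD c 0 + 1)) (PySem.Dict.empty : PySem.Dict String Int)
  let d : PySem.Dict String (List (Int × Int)) := PySem.Dict.mk cards_pos_dict
  (cards.foldl (pvStepB counts d) PySem.Dict.empty).items

-- ===== PRECONDITION & SPEC =====
def Spec_find_repeated_cards_click_position (cards : List String) (cards_pos_dict : List (String × List (Int × Int))) (out : List (String × List (Int × Int))) : Prop := out = find_repeated_cards_click_position_alt cards cards_pos_dict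
instance (cards : List String) (cards_pos_dict : List (String × List (Int × Int))) (out : List (String × List (Int × Int))) : Decidable (Spec_find_repeated_cards_click_position cards cards_pos_dict out) := by unfold Spec_find_repeated_cards_click_position; infer_instance

-- ===== CLAIM (what is proved, stated in full; the proofs are below) =====
def Claim_equal_find_repeated_cards_click_position : Prop := ∀ (cards : List String) (cards_pos_dict : List (String × List (Int × Int))), Dom_find_repeated_cards_click_position cards cards_pos_dict → Spec_find_repeated_cards_click_position cards cards_pos_dict (find_repeated_cards_click_position cards cards_pos_dict)

-- ===== LEMMAS AND PROOFS =====

-- value A stores for a key c present in cards_pos_dict (after its while-loop)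
def pvValA (cards : List String) (d : PySem.Dict String (List (Int × Int))) (c : String) : List (Int × Int) :=
  (d.getD c []).take (PySem.List.count cards c)

-- value B stores for such a key
def pvValB (cards : List String) (d : PySem.Dict String (List (Int × Int))) (c : String) : List (Int × Int) :=
  if (min ((PySem.List.count cards c : Int)) (((d.getD c []).length : Int)) == 0) then []
  else if (min ((PySem.List.count cards c : Int)) (((d.getD c []).length : Int)) == 1) then
    [PySem.List.pyGetD (d.getD c []) 0 (0, 0)]
  else
    [PySem.List.pyGetD (d.getD c []) 0 (0, 0),
     PySem.List.pyGetD (d.getD c []) (min ((PySem.List.count cards c : Int)) (((d.getD c []).length : Int)) - 1) (0, 0)]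

theorem pvWhileA_eq (ps : List (Int × Int)) (needed : Int) (cur : List (Int × Int)) :
    pvWhileA ps needed cur = cur ++ (ps.drop cur.length).take ((needed - cur.length).toNat) := by
  fun_induction pvWhileA ps needed cur with
  | case1 cur h ih =>
    rw [ih]
    have hdrop : ps.drop cur.length = ps[cur.length]'h.2 :: ps.drop (cur.length + 1) :=
      List.drop_eq_getElem_cons h.2
    have hn : (needed - (cur.length : Int)).toNat
        = ((needed - ((cur ++ [ps[cur.length]'h.2]).length : Int)).toNat) + 1 := by
      simp; omega
    simp only [hdrop, hn, List.take_succ_cons]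
    simp
  | case2 cur h =>
    have h3 : (ps.drop cur.length).take ((needed - (cur.length : Int)).toNat) = [] := by
      rcases not_and_or.mp h with h1 | h2
      · have hz : (needed - (cur.length : Int)).toNat = 0 := by omega
        rw [hz, List.take_zero]
      · rw [List.drop_eq_nil_of_le (by omega), List.take_nil]
    rw [h3, List.append_nil]

theorem pvWhileA_nil (ps : List (Int × Int)) (c : Nat) :
    pvWhileA ps (c : Int) [] = ps.take c := by
  rw [pvWhileA_eq]; simp

theorem pvWhileA_fix (ps : List (Int × Int)) (c : Nat) :
    pvWhileA ps (c : Int) (ps.take c) = ps.take c := by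
  rw [pvWhileA_eq]
  have h3 : (ps.drop (ps.take c).length).take (((c : Int) - ((ps.take c).length : Int)).toNat) = [] := by
    rcases Nat.lt_or_ge c ps.length with h | h
    · have hz : ((c : Int) - ((ps.take c).length : Int)).toNat = 0 := by simp; omega
      rw [hz, List.take_zero]
    · rw [List.drop_eq_nil_of_le (by simp; omega), List.take_nil]
  rw [h3, List.append_nil]

-- B's direct endpoint formula equals A's trim of the taken prefix
theorem pv_trim_eq (ps : List (Int × Int)) (k : Nat) :
    (if (min ((k : Int)) ((ps.length : Int)) == 0) = true then ([] : List (Int × Int))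
     else if (min ((k : Int)) ((ps.length : Int)) == 1) = true then [PySem.List.pyGetD ps 0 (0, 0)]
     else [PySem.List.pyGetD ps 0 (0, 0),
           PySem.List.pyGetD ps (min ((k : Int)) ((ps.length : Int)) - 1) (0, 0)])
      = pvTrimA (ps.take k) := by
  rcases Nat.lt_or_ge k ps.length with hkl | hkl
  · -- k < ps.length : min = k
    have hn : min ((k : Int)) ((ps.length : Int)) = (k : Int) := by omega
    rw [hn]
    rcases k with _ | _ | k
    · simp [pvTrimA]
    · have h0 : 0 < ps.length := by omega
      have hrhs : pvTrimA (ps.take 1) = [ps[0]] := by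
        unfold pvTrimA
        have h1 : (ps.take 1).length = 1 := by simp; omega
        rw [if_neg (by omega), if_pos h1]
        rw [PySem.List.pyGet?_zero]
        simp [List.getElem?_eq_getElem (by omega : 0 < (ps.take 1).length), List.getElem_take]
      rw [hrhs]
      rw [if_neg (by simp), if_pos (by simp)]
      rw [show (0 : Int) = ((0 : Nat) : Int) by simp, PySem.List.pyGetD_natCast]
      simp [List.getD, List.getElem?_eq_getElem h0]
    · -- at least two selected
      have hlen2 : (ps.take (k + 1 + 1)).length = k + 2 := by simp; omega
      have hget0 : PySem.List.pyGet? (ps.take (k + 1 + 1)) 0 = some (ps[0]'(by omega)) := by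
        rw [PySem.List.pyGet?_zero]
        simp [List.getElem?_eq_getElem (by omega : 0 < (ps.take (k+1+1)).length), List.getElem_take]
      have hgetl : PySem.List.pyGet? (ps.take (k + 1 + 1)) (-1) = some (ps[k + 1]'(by omega)) := by
        rw [PySem.List.pyGet?_neg_one, List.getLast?_eq_getElem?]
        rw [hlen2]
        simp [List.getElem?_eq_getElem (by omega : k + 1 < (ps.take (k+1+1)).length), List.getElem_take]
      have hrhs : pvTrimA (ps.take (k + 1 + 1)) = [ps[0]'(by omega), ps[k + 1]'(by omega)] := by
        unfold pvTrimA
        rw [if_pos (by omega), hget0, hgetl]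
      rw [hrhs]
      have e0 : PySem.List.pyGetD ps 0 (0, 0) = ps[0]'(by omega) := by
        rw [show (0 : Int) = ((0 : Nat) : Int) by simp, PySem.List.pyGetD_natCast]
        simp [List.getD, List.getElem?_eq_getElem (by omega : 0 < ps.length)]
      have e1 : PySem.List.pyGetD ps (((k + 1 + 1 : Nat) : Int) - 1) (0, 0) = ps[k + 1]'(by omega) := by
        rw [show ((k + 1 + 1 : Nat) : Int) - 1 = (((k + 1 : Nat)) : Int) by push_cast; ring,
          PySem.List.pyGetD_natCast]
        simp [List.getD, List.getElem?_eq_getElem (by omega : k + 1 < ps.length)]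
      rw [if_neg (by simp only [beq_iff_eq]; push_cast; omega),
          if_neg (by simp only [beq_iff_eq]; push_cast; omega), e0, e1]
  · -- ps.length ≤ k : min = length, take k = ps
    have hn : min ((k : Int)) ((ps.length : Int)) = (ps.length : Int) := by omega
    have htk : ps.take k = ps := List.take_of_length_le hkl
    rw [hn, htk]
    match ps with
    | [] => simp [pvTrimA]
    | [a] =>
      rw [if_neg (by simp), if_pos (by simp)]
      unfold pvTrimA
      rw [if_neg (by simp), if_pos (by simp), PySem.List.pyGet?_zero]
      rw [show (0 : Int) = ((0 : Nat) : Int) by simp, PySem.List.pyGetD_natCast]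
      simp [List.getD]
    | a :: b :: rest =>
      have hl : (a :: b :: rest).length = rest.length + 2 := by simp
      rw [hl]
      rw [if_neg (by simp only [beq_iff_eq]; push_cast; omega),
          if_neg (by simp only [beq_iff_eq]; push_cast; omega)]
      unfold pvTrimA
      rw [if_pos (by simp)]
      have hget0 : PySem.List.pyGet? (a :: b :: rest) 0 = some a := by
        rw [PySem.List.pyGet?_zero]; rfl
      have hgetl : PySem.List.pyGet? (a :: b :: rest) (-1)
          = some ((a :: b :: rest).getLast (by simp)) := by
        rw [PySem.List.pyGet?_neg_one, List.getLast?_eq_some_getLast]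
      rw [hget0, hgetl]
      have e0 : PySem.List.pyGetD (a :: b :: rest) 0 (0, 0) = a := by
        rw [show (0 : Int) = ((0 : Nat) : Int) by simp, PySem.List.pyGetD_natCast]; rfl
      have e1 : PySem.List.pyGetD (a :: b :: rest) (((rest.length + 2 : Nat) : Int) - 1) (0, 0)
          = (a :: b :: rest).getLast (by simp) := by
        rw [show ((rest.length + 2 : Nat) : Int) - 1 = (((rest.length + 1 : Nat)) : Int) by push_cast; ring,
          PySem.List.pyGetD_natCast]
        rw [List.getLast_eq_getElem]
        simp [List.getD]
      rw [e0, e1]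

theorem pvValB_eq_trim_valA (cards : List String) (d : PySem.Dict String (List (Int × Int)))
    (c : String) : pvValB cards d c = pvTrimA (pvValA cards d c) := by
  unfold pvValA pvValB
  exact pv_trim_eq (d.getD c []) (PySem.List.count cards c)

-- first-match lookup in a self-keyed map list
theorem pv_get?_mk_map {ν : Type} (ks : List String) (g : String → ν) (k : String) :
    (PySem.Dict.mk (ks.map (fun c => (c, g c)))).get? k
      = if k ∈ ks then some (g k) else none := by
  induction ks with
  | nil => simp [PySem.Dict.get?]
  | cons c cs ih =>
    simp only [List.map_cons, PySem.Dict.get?_mk_cons, ih, List.mem_cons]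
    by_cases hck : c = k
    · subst hck; simp
    · have : (c == k) = false := by simp [hck]
      simp [this, Ne.symm hck]

theorem pv_contains_mk_map {ν : Type} (ks : List String) (g : String → ν) (k : String) :
    (PySem.Dict.mk (ks.map (fun c => (c, g c)))).contains k = decide (k ∈ ks) := by
  rw [PySem.Dict.contains_eq_isSome_get?, pv_get?_mk_map]
  by_cases h : k ∈ ks <;> simp [h]

theorem pv_getD_mk_map {ν : Type} (ks : List String) (g : String → ν) (k : String)
    (h : k ∈ ks) (d0 : ν) :
    (PySem.Dict.mk (ks.map (fun c => (c, g c)))).getD k d0 = g k := by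
  apply PySem.Dict.getD_of_get?_eq_some
  rw [pv_get?_mk_map, if_pos h]

theorem pv_insert_mk_map_mem {ν : Type} (ks : List String) (g : String → ν) (k : String)
    (h : k ∈ ks) :
    (PySem.Dict.mk (ks.map (fun c => (c, g c)))).insert k (g k)
      = PySem.Dict.mk (ks.map (fun c => (c, g c))) := by
  apply PySem.Dict.ext
  rw [PySem.Dict.items_insert_of_contains _ _ (by rw [pv_contains_mk_map]; simpa)]
  show List.map _ (ks.map (fun c => (c, g c))) = _
  rw [List.map_map]
  apply List.map_congr_left
  intro c _
  by_cases hck : c = k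
  · subst hck; simp
  · simp [hck]

theorem pv_insert_mk_map_fresh {ν : Type} (ks : List String) (g : String → ν) (k : String)
    (h : k ∉ ks) (v : ν) (hv : v = g k) :
    (PySem.Dict.mk (ks.map (fun c => (c, g c)))).insert k v
      = PySem.Dict.mk ((ks ++ [k]).map (fun c => (c, g c))) := by
  apply PySem.Dict.ext
  rw [PySem.Dict.items_insert_of_not_contains _ _ (by rw [pv_contains_mk_map]; simpa)]
  simp [hv]

-- the main loop invariant: after any prefix, A's dict holds pvValA and B's holds pvValB
-- on the same key list, so trimming A's items pointwise gives B's items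
theorem pv_main (cards : List String) (d : PySem.Dict String (List (Int × Int)))
    (cc cnt : PySem.Dict String Int)
    (hcc : ∀ c, cc.getD c 0 = (PySem.List.count cards c : Int))
    (hcnt : ∀ c, cnt.getD c 0 = (PySem.List.count cards c : Int)) :
    ∀ (rest ks : List String),
      (rest.foldl (pvStepA cc d) (PySem.Dict.mk (ks.map (fun c => (c, pvValA cards d c))))).items.map
          (fun p => (p.1, pvTrimA p.2))
        = (rest.foldl (pvStepB cnt d) (PySem.Dict.mk (ks.map (fun c => (c, pvValB cards d c))))).items := by
  intro rest
  induction rest with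
  | nil =>
    intro ks
    show (ks.map (fun c => (c, pvValA cards d c))).map (fun p => (p.1, pvTrimA p.2))
        = ks.map (fun c => (c, pvValB cards d c))
    rw [List.map_map]
    apply List.map_congr_left
    intro c _
    simp [pvValB_eq_trim_valA]
  | cons card rest ih =>
    intro ks
    simp only [List.foldl_cons]
    rcases hg : d.get? card with _ | ps
    · -- card not in cards_pos_dict: both steps do nothing
      have hc : d.contains card = false := by
        rw [PySem.Dict.contains_eq_isSome_get?, hg]; rfl
      rw [show pvStepA cc d (PySem.Dict.mk (ks.map (fun c => (c, pvValA cards d c)))) card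
            = PySem.Dict.mk (ks.map (fun c => (c, pvValA cards d c))) by
          unfold pvStepA; rw [hg]]
      rw [show pvStepB cnt d (PySem.Dict.mk (ks.map (fun c => (c, pvValB cards d c)))) card
            = PySem.Dict.mk (ks.map (fun c => (c, pvValB cards d c))) by
          unfold pvStepB; rw [hc]; simp]
      exact ih ks
    · have hgetd : d.getD card [] = ps := PySem.Dict.getD_of_get?_eq_some _ _ hg
      have hcd : d.contains card = true := by
        rw [PySem.Dict.contains_eq_isSome_get?, hg]; rfl
      by_cases hmem : card ∈ ks
      · -- repeat occurrence: A's while-loop is a no-op and the overwrite re-stores the same value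
        have hA : pvStepA cc d (PySem.Dict.mk (ks.map (fun c => (c, pvValA cards d c)))) card
            = PySem.Dict.mk (ks.map (fun c => (c, pvValA cards d c))) := by
          unfold pvStepA
          rw [hg]
          simp only [pv_contains_mk_map, hmem, decide_true, if_true]
          rw [pv_getD_mk_map _ _ _ hmem, hcc]
          have hw : pvWhileA ps ((PySem.List.count cards card : Nat) : Int) (pvValA cards d card)
              = pvValA cards d card := by
            unfold pvValA; rw [hgetd]; exact pvWhileA_fix ps _
          rw [hw]
          exact pv_insert_mk_map_mem _ _ _ hmem
        have hB : pvStepB cnt d (PySem.Dict.mk (ks.map (fun c => (c, pvValB cards d c)))) card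
            = PySem.Dict.mk (ks.map (fun c => (c, pvValB cards d c))) := by
          unfold pvStepB
          rw [hcd, pv_contains_mk_map]
          simp [hmem]
        rw [hA, hB]; exact ih ks
      · -- first occurrence: both append the key with their respective values
        have hA : pvStepA cc d (PySem.Dict.mk (ks.map (fun c => (c, pvValA cards d c)))) card
            = PySem.Dict.mk ((ks ++ [card]).map (fun c => (c, pvValA cards d c))) := by
          unfold pvStepA
          rw [hg]
          simp only [pv_contains_mk_map, hmem, decide_false, Bool.false_eq_true, if_false]
          rw [PySem.Dict.getD_insert_self, PySem.Dict.insert_insert_self, hcc]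
          apply pv_insert_mk_map_fresh _ _ _ hmem
          unfold pvValA; rw [hgetd]; exact pvWhileA_nil ps _
        have hB : pvStepB cnt d (PySem.Dict.mk (ks.map (fun c => (c, pvValB cards d c)))) card
            = PySem.Dict.mk ((ks ++ [card]).map (fun c => (c, pvValB cards d c))) := by
          unfold pvStepB
          rw [hcd, pv_contains_mk_map]
          simp only [hmem, decide_false, Bool.not_false, Bool.and_true, if_true]
          rw [hcnt]
          have hcollect :
              (if (min ((PySem.List.count cards card : Int)) (((d.getD card []).length : Int)) == 0) = true then
                 (PySem.Dict.mk (ks.map (fun c => (c, pvValB cards d c)))).insert card []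
               else if (min ((PySem.List.count cards card : Int)) (((d.getD card []).length : Int)) == 1) = true then
                 (PySem.Dict.mk (ks.map (fun c => (c, pvValB cards d c)))).insert card
                   [PySem.List.pyGetD (d.getD card []) 0 (0, 0)]
               else
                 (PySem.Dict.mk (ks.map (fun c => (c, pvValB cards d c)))).insert card
                   [PySem.List.pyGetD (d.getD card []) 0 (0, 0),
                    PySem.List.pyGetD (d.getD card [])
                      (min ((PySem.List.count cards card : Int)) (((d.getD card []).length : Int)) - 1) (0, 0)])
              = (PySem.Dict.mk (ks.map (fun c => (c, pvValB cards d c)))).insert card (pvValB cards d card) := by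
            unfold pvValB; split_ifs <;> rfl
          rw [hcollect]
          exact pv_insert_mk_map_fresh _ _ _ hmem _ rfl
        rw [hA, hB]; exact ih (ks ++ [card])

theorem pv_count_lookup (cards : List String) (c : String) :
    (PySem.Dict.mk ((PySem.Set.ofList cards).map (fun c => (c, (PySem.List.count cards c : Int))))).getD c 0
      = (PySem.List.count cards c : Int) := by
  rw [PySem.Dict.getD_eq_get?_getD, pv_get?_mk_map]
  by_cases h : c ∈ PySem.Set.ofList cards
  · simp [h]
  · have hnc : c ∉ cards := fun hc => h ((PySem.Set.mem_ofList cards c).mpr hc)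
    have hz : List.count c cards = 0 := List.count_eq_zero.mpr hnc
    simp [h, hz]

-- ===== VERDICT (by name: the statement is the Claim_ definition above) =====
theorem find_repeated_cards_click_position_spec : Claim_equal_find_repeated_cards_click_position := by
  intro cards cpd _
  unfold Spec_find_repeated_cards_click_position
  unfold find_repeated_cards_click_position find_repeated_cards_click_position_alt
  simp only []
  have hm := pv_main cards (PySem.Dict.mk cpd)
    (PySem.Dict.mk ((PySem.Set.ofList cards).map (fun c => (c, (PySem.List.count cards c : Int)))))
    (cards.foldl (fun d c => d.insert c (d.getD c 0 + 1)) PySem.Dict.empty)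
    (fun c => pv_count_lookup cards c)
    (fun c => by
      rw [PySem.Dict.getD_foldl_insert_add_one]
      simp [PySem.Dict.getD_empty, PySem.List.count])
    cards []
  simpa using hm
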